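-- pv_equiv track=rewrite | github.com/Liuian/UU_Explainable_AI_Group_Project | part_2_NL/nl_v3.py | past_to_gerund
-- ===== SOURCE A (Python) =====
-- def past_to_gerund(past_text):
--     replacements = {
--         'got ': 'getting ',
--         'obtained ': 'obtaining ',
--         'paid ': 'paying ',
--         'went ': 'going ',
--         'own ': 'owning ',
--     }
--     for k, v in replacements.items():
--         if past_text.startswith(k):
--             return past_text.replace(k, v, 1)
--     return past_text + "ing"
-- ===== SOURCE B (Python) =====
-- def past_to_gerund(past_text):
--     mapping = {
--         'got': 'getting',
--         'obtained': 'obtaining',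
--         'paid': 'paying',
--         'went': 'going',
--         'own': 'owning',
--     }
--     head, sep, tail = past_text.partition(' ')
--     if sep and head in mapping:
--         return mapping[head] + ' ' + tail
--     return past_text + "ing"
-- ===== Notes on version B (the rewrite author's own statement) =====
-- stated objective: idiomatic
-- what changed: Replaces the startswith-scan over a prefix dict (and replace with count 1) by a single partition of the first token plus a direct lookup of the bare word in a gerund map.
import Mathlib
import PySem

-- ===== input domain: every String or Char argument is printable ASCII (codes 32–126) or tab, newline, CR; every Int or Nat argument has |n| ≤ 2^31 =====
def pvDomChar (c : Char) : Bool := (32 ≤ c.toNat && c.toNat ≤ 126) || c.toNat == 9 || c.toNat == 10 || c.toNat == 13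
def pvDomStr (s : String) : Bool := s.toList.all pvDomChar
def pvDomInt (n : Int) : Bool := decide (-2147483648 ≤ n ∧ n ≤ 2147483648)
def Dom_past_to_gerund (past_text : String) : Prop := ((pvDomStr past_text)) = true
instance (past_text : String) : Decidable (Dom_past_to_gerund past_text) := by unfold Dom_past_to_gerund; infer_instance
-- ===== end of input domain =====

-- B replaces A's prefix-scan over a replacement dict by partitioning off the first token and looking up the bare word in a gerund map (idiomatic).


-- ===== PORT A =====
-- s.replace(old, new, 1): splice `new` in place of the FIRST occurrence of `old`.
-- Exact for nonempty `old` (all of A's keys are nonempty).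
def pvReplaceFirst (s old new : List Char) : List Char :=
  match s with
  | [] => []
  | c :: rest =>
    if PySem.Chars.startswith (c :: rest) old then new ++ (c :: rest).drop old.length
    else c :: pvReplaceFirst rest old new

-- A iterates the dict {'got ': 'getting ', …} in insertion order; that is this if-chain.
def pvAcore (cs : List Char) : List Char :=
  if PySem.Chars.startswith cs ("got ".toList) then pvReplaceFirst cs ("got ".toList) ("getting ".toList)
  else if PySem.Chars.startswith cs ("obtained ".toList) then pvReplaceFirst cs ("obtained ".toList) ("obtaining ".toList)
  else if PySem.Chars.startswith cs ("paid ".toList) then pvReplaceFirst cs ("paid ".toList) ("paying ".toList)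
  else if PySem.Chars.startswith cs ("went ".toList) then pvReplaceFirst cs ("went ".toList) ("going ".toList)
  else if PySem.Chars.startswith cs ("own ".toList) then pvReplaceFirst cs ("own ".toList) ("owning ".toList)
  else cs ++ "ing".toList

def past_to_gerund (past_text : String) : String := String.ofList (pvAcore past_text.toList)

-- ===== PORT B =====
-- past_text.partition(' '): (head, sep-found?, tail)
def pvPartitionSpace (cs : List Char) : List Char × Bool × List Char :=
  match cs with
  | [] => ([], false, [])
  | c :: rest =>
    if c = ' ' then ([], true, rest)
    else
      let p := pvPartitionSpace rest
      (c :: p.1, p.2.1, p.2.2)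

def pvGerundMap : List (List Char × List Char) :=
  [("got".toList, "getting".toList), ("obtained".toList, "obtaining".toList),
   ("paid".toList, "paying".toList), ("went".toList, "going".toList),
   ("own".toList, "owning".toList)]

def pvBcore (cs : List Char) : List Char :=
  let p := pvPartitionSpace cs
  if p.2.1 then
    match pvGerundMap.lookup p.1 with
    | some g => g ++ ' ' :: p.2.2
    | none => cs ++ "ing".toList
  else cs ++ "ing".toList

def past_to_gerund_alt (past_text : String) : String := String.ofList (pvBcore past_text.toList)

-- ===== PRECONDITION & SPEC =====
def Spec_past_to_gerund (past_text : String) (out : String) : Prop := out = past_to_gerund_alt past_text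
instance (past_text : String) (out : String) : Decidable (Spec_past_to_gerund past_text out) := by unfold Spec_past_to_gerund; infer_instance

-- ===== CLAIM (what is proved, stated in full; the proofs are below) =====
def Claim_equal_past_to_gerund : Prop := ∀ (past_text : String), Dom_past_to_gerund past_text → Spec_past_to_gerund past_text (past_to_gerund past_text)

-- ===== LEMMAS AND PROOFS =====


-- a true sep flag means the input splits as head ++ ' ' :: tail
theorem pvPartition_sep {cs h t : List Char} (hp : pvPartitionSpace cs = (h, true, t)) :
    cs = h ++ ' ' :: t := by
  induction cs generalizing h t with
  | nil => simp [pvPartitionSpace] at hp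
  | cons c rest ih =>
    by_cases hc : c = ' '
    · simp [pvPartitionSpace, hc] at hp
      simp [hc, hp.1.symm, hp.2.symm]
    · rcases hq : pvPartitionSpace rest with ⟨ph, ps, pt⟩
      simp [pvPartitionSpace, hc, hq] at hp
      obtain ⟨rfl, hs, rfl⟩ := hp
      subst hs
      simpa using ih hq

theorem pv_core_eq (cs : List Char) : pvAcore cs = pvBcore cs := by
  unfold pvAcore
  split_ifs with h1 h2 h3 h4 h5
  · obtain ⟨t, rfl⟩ := (PySem.Chars.startswith_iff _ _).1 h1
    simp [pvReplaceFirst, pvBcore, PySem.Chars.startswith,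
      pvPartitionSpace, pvGerundMap]
  · obtain ⟨t, rfl⟩ := (PySem.Chars.startswith_iff _ _).1 h2
    simp [pvReplaceFirst, pvBcore, PySem.Chars.startswith,
      pvPartitionSpace, pvGerundMap, List.lookup]
  · obtain ⟨t, rfl⟩ := (PySem.Chars.startswith_iff _ _).1 h3
    simp [pvReplaceFirst, pvBcore, PySem.Chars.startswith,
      pvPartitionSpace, pvGerundMap, List.lookup]
  · obtain ⟨t, rfl⟩ := (PySem.Chars.startswith_iff _ _).1 h4
    simp [pvReplaceFirst, pvBcore, PySem.Chars.startswith,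
      pvPartitionSpace, pvGerundMap, List.lookup]
  · obtain ⟨t, rfl⟩ := (PySem.Chars.startswith_iff _ _).1 h5
    simp [pvReplaceFirst, pvBcore, PySem.Chars.startswith,
      pvPartitionSpace, pvGerundMap, List.lookup]
  · rcases hq : pvPartitionSpace cs with ⟨ph, ps, pt⟩
    cases ps with
    | false => simp [pvBcore, hq]
    | true =>
      have hcs := pvPartition_sep hq
      by_cases e1 : ph = "got".toList
      · exact absurd ((PySem.Chars.startswith_iff _ _).2 ⟨pt, by rw [hcs, e1]; rfl⟩) h1
      by_cases e2 : ph = "obtained".toList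
      · exact absurd ((PySem.Chars.startswith_iff _ _).2 ⟨pt, by rw [hcs, e2]; rfl⟩) h2
      by_cases e3 : ph = "paid".toList
      · exact absurd ((PySem.Chars.startswith_iff _ _).2 ⟨pt, by rw [hcs, e3]; rfl⟩) h3
      by_cases e4 : ph = "went".toList
      · exact absurd ((PySem.Chars.startswith_iff _ _).2 ⟨pt, by rw [hcs, e4]; rfl⟩) h4
      by_cases e5 : ph = "own".toList
      · exact absurd ((PySem.Chars.startswith_iff _ _).2 ⟨pt, by rw [hcs, e5]; rfl⟩) h5
      have b1 : (ph == ('g'::'o'::'t'::[])) = false := by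
        rw [beq_eq_false_iff_ne]; exact e1
      have b2 : (ph == ('o'::'b'::'t'::'a'::'i'::'n'::'e'::'d'::[])) = false := by
        rw [beq_eq_false_iff_ne]; exact e2
      have b3 : (ph == ('p'::'a'::'i'::'d'::[])) = false := by
        rw [beq_eq_false_iff_ne]; exact e3
      have b4 : (ph == ('w'::'e'::'n'::'t'::[])) = false := by
        rw [beq_eq_false_iff_ne]; exact e4
      have b5 : (ph == ('o'::'w'::'n'::[])) = false := by
        rw [beq_eq_false_iff_ne]; exact e5
      simp [pvBcore, hq, pvGerundMap, List.lookup, b1, b2, b3, b4, b5]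
-- ===== VERDICT (by name: the statement is the Claim_ definition above) =====
theorem past_to_gerund_spec : Claim_equal_past_to_gerund := by
  intro s _
  unfold Spec_past_to_gerund past_to_gerund past_to_gerund_alt
  rw [pv_core_eq]
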